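-- pv_equiv track=rewrite | github.com/drizztSun/common_project | PythonLeetcode/leetcodeM/763_PartitionLabels.py | doit_greedy
-- ===== SOURCE A (Python) =====
-- def doit_greedy(S):
--     last = {c: i for i, c in enumerate(S)}
--     j = anchor = 0
--     ans = []
--     for i, c in enumerate(S):
--         j = max(j, last[c])
--         if i == j:
--             ans.append(i - anchor + 1)
--             anchor = i + 1
--
--     return ans
-- ===== SOURCE B (Python) =====
-- def doit_greedy(S):
--     # interval-merge reformulation: one [first,last] interval per distinct char
--     # (in first-appearance order), merged left to right.
--     intervals = {}
--     for i, c in enumerate(S):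
--         if c in intervals:
--             intervals[c] = (intervals[c][0], i)
--         else:
--             intervals[c] = (i, i)
--     ans = []
--     cur = None
--     for s, e in intervals.values():
--         if cur is None:
--             cur = (s, e)
--         elif s <= cur[1]:
--             cur = (cur[0], max(cur[1], e))
--         else:
--             ans.append(cur[1] - cur[0] + 1)
--             cur = (s, e)
--     if cur is not None:
--         ans.append(cur[1] - cur[0] + 1)
--     return ans
-- ===== Notes on version B (the rewrite author's own statement) =====
-- stated objective: alternative
-- what changed: Replaces A's single running-max/anchor sweep over positions with building one [first,last] index interval per distinct character and then merging overlapping intervals in first-appearance order, emitting merged interval lengths.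
import Mathlib
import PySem

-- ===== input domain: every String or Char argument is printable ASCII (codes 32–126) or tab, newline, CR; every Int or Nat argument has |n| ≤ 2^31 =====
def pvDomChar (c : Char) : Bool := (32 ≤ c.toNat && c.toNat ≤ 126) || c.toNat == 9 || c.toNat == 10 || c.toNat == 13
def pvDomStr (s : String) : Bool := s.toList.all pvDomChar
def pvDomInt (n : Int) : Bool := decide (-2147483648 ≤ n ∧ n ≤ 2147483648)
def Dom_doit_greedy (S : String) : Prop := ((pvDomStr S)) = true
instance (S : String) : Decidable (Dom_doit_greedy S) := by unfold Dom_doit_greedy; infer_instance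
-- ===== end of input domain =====

-- B replaces A's running-max/anchor sweep by building one [first,last] interval per
-- distinct character and merging overlapping intervals in first-appearance order
-- (objective: alternative decomposition, same O(n) cost).

-- ===== PORT A =====
def doit_greedy (S : String) : List Int :=
  let cs := S.toList
  -- last = {c: i for i, c in enumerate(S)}
  let last : PySem.Dict Char Int :=
    (PySem.List.enumerate cs).foldl (fun d p => d.insert p.2 p.1) PySem.Dict.empty
  -- j = anchor = 0; ans = []; for i, c in enumerate(S): ...
  -- last[c]: the key is always present (c occurs in S), so the KeyError branch is
  -- unreachable; `getD … 0` is exact here.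
  let st :=
    (PySem.List.enumerate cs).foldl
      (fun (st : Int × Int × List Int) p =>
        let j := max st.1 (last.getD p.2 0)
        if p.1 = j then (j, p.1 + 1, st.2.2 ++ [p.1 - st.2.1 + 1])
        else (j, st.2.1, st.2.2))
      (0, 0, [])
  st.2.2

-- ===== PORT B =====
def doit_greedy_alt (S : String) : List Int :=
  let cs := S.toList
  -- intervals = {}; for i, c in enumerate(S): …
  let intervals : PySem.Dict Char (Int × Int) :=
    (PySem.List.enumerate cs).foldl
      (fun d p =>
        if d.contains p.2 then d.insert p.2 ((d.getD p.2 (0, 0)).1, p.1)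
        else d.insert p.2 (p.1, p.1))
      PySem.Dict.empty
  -- ans = []; cur = None; for s, e in intervals.values(): …
  let st :=
    intervals.values.foldl
      (fun (st : Option (Int × Int) × List Int) iv =>
        match st.1 with
        | none => (some iv, st.2)
        | some cur =>
          if iv.1 ≤ cur.2 then (some (cur.1, max cur.2 iv.2), st.2)
          else (some iv, st.2 ++ [cur.2 - cur.1 + 1]))
      (none, [])
  match st.1 with
  | none => st.2
  | some cur => st.2 ++ [cur.2 - cur.1 + 1]

-- ===== PRECONDITION & SPEC =====
def Spec_doit_greedy (S : String) (out : List Int) : Prop := out = doit_greedy_alt S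
instance (S : String) (out : List Int) : Decidable (Spec_doit_greedy S out) := by unfold Spec_doit_greedy; infer_instance

-- ===== CLAIM (what is proved, stated in full; the proofs are below) =====
def Claim_equal_doit_greedy : Prop := ∀ (S : String), Dom_doit_greedy S → Spec_doit_greedy S (doit_greedy S)

-- ===== LEMMAS AND PROOFS =====

-- last index of c in cs (0 if absent), exactly the value A's dict stores at c
def pvLa (cs : List Char) (c : Char) : Int :=
  (PySem.List.enumerate cs).foldl (fun a p => if p.2 = c then p.1 else a) 0

-- running maximum of pvLa over the first k positions, 0-initialised like A's j
def pvRm (cs : List Char) : Nat → Int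
  | 0 => 0
  | k + 1 => max (pvRm cs k) (pvLa cs (cs.getD k ' '))

-- position i holds the first occurrence of its character
def pvIsFirst (cs : List Char) (i : Nat) : Bool := !((cs.take i).contains (cs.getD i ' '))

-- cut positions among the first k positions (A appends exactly there)
def pvCuts (cs : List Char) (k : Nat) : List Nat :=
  (List.range k).filter (fun i => decide (pvRm cs (i + 1) = (i : Int)))

-- block lengths of a cut list, given the current anchor
def pvLens : Int → List Nat → List Int
  | _, [] => []
  | p, i :: rest => ((i : Int) - p + 1) :: pvLens ((i : Int) + 1) rest

-- anchor after a cut list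
def pvAnch : Int → List Nat → Int
  | p, [] => p
  | _, i :: rest => pvAnch ((i : Int) + 1) rest

theorem pvLens_append (l : List Nat) (p : Int) (i : Nat) :
    pvLens p (l ++ [i]) = pvLens p l ++ [(i : Int) - pvAnch p l + 1] := by
  induction l generalizing p with
  | nil => rfl
  | cons x xs ih => simp [pvLens, pvAnch, ih]

theorem pvAnch_append (l : List Nat) (p : Int) (i : Nat) :
    pvAnch p (l ++ [i]) = (i : Int) + 1 := by
  induction l generalizing p with
  | nil => rfl
  | cons x xs ih => simp [pvAnch, ih]

theorem pvCuts_succ (cs : List Char) (k : Nat) :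
    pvCuts cs (k + 1) =
      pvCuts cs k ++ if pvRm cs (k + 1) = (k : Int) then [k] else [] := by
  simp [pvCuts, List.range_succ, List.filter_append]
  split_ifs with h <;> simp [h]

theorem pvLa_append (xs : List Char) (x c : Char) :
    pvLa (xs ++ [x]) c = if x = c then (xs.length : Int) else pvLa xs c := by
  simp only [pvLa, PySem.List.enumerate_append, List.foldl_append]
  have h1 : PySem.List.enumerate [x] ((0 : Int) + xs.length) =
      [(((0 : Int) + xs.length, x) : Int × Char)] := by
    simp [PySem.List.enumerate_cons, PySem.List.enumerate_nil]
  rw [h1]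
  simp only [List.foldl_cons, List.foldl_nil]
  by_cases h : x = c <;> simp [h]

theorem pvLa_nonneg (cs : List Char) (c : Char) : 0 ≤ pvLa cs c := by
  induction cs using List.reverseRecOn with
  | nil => simp [pvLa, PySem.List.enumerate_nil]
  | append_singleton xs x ih =>
    rw [pvLa_append]
    split_ifs with h
    · exact Int.natCast_nonneg _
    · exact ih

theorem pvLa_ge (cs : List Char) (i : Nat) (h : i < cs.length) :
    (i : Int) ≤ pvLa cs (cs.getD i ' ') := by
  induction cs using List.reverseRecOn with
  | nil => simp at h
  | append_singleton xs x ih =>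
    rcases Nat.lt_or_ge i xs.length with hi | hi
    · rw [List.getD_append _ _ _ _ hi, pvLa_append]
      split_ifs with hx
      · exact_mod_cast Int.ofNat_le.mpr (le_of_lt hi)
      · exact ih hi
    · have hieq : i = xs.length := by
        simp only [List.length_append, List.length_cons, List.length_nil] at h; omega
      subst hieq
      have hg : (xs ++ [x]).getD xs.length ' ' = x := by
        simp [List.getD_eq_getElem?_getD]
      rw [hg, pvLa_append, if_pos rfl]

theorem pvLa_le (cs : List Char) (c : Char) (h : cs ≠ []) :
    pvLa cs c ≤ (cs.length : Int) - 1 := by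
  induction cs using List.reverseRecOn with
  | nil => simp at h
  | append_singleton xs x ih =>
    rw [pvLa_append]
    simp only [List.length_append, List.length_cons, List.length_nil]
    split_ifs with hx
    · push_cast; omega
    · rcases eq_or_ne xs [] with rfl | hne
      · simp [pvLa, PySem.List.enumerate_nil]
      · have := ih hne; push_cast at this ⊢; omega

theorem pvRm_mono (cs : List Char) {k k' : Nat} (h : k ≤ k') : pvRm cs k ≤ pvRm cs k' := by
  induction k' with
  | zero => have : k = 0 := Nat.le_zero.mp h; subst this; exact le_refl _
  | succ m ih =>
    rcases Nat.eq_or_lt_of_le h with rfl | hlt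
    · exact le_refl _
    · exact le_trans (ih (Nat.lt_succ_iff.mp hlt)) (le_max_left _ _)

theorem pvRm_ge (cs : List Char) (k : Nat) (h1 : 1 ≤ k) (h2 : k ≤ cs.length) :
    (k : Int) - 1 ≤ pvRm cs k := by
  obtain ⟨m, rfl⟩ : ∃ m, k = m + 1 := ⟨k - 1, by omega⟩
  have hge := pvLa_ge cs m (by omega)
  have h2' : pvLa cs (cs.getD m ' ') ≤ pvRm cs (m + 1) := by
    simp only [pvRm]; exact le_max_right _ _
  push_cast; omega

theorem pvRm_le (cs : List Char) (k : Nat) (h : cs ≠ []) :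
    pvRm cs k ≤ (cs.length : Int) - 1 := by
  induction k with
  | zero =>
    have hl : 0 < cs.length := List.length_pos_of_ne_nil h
    simp only [pvRm]; omega
  | succ m ih => simp only [pvRm]; exact max_le ih (pvLa_le cs _ h)

theorem pvRm_final (cs : List Char) (h : cs ≠ []) :
    pvRm cs cs.length = (cs.length : Int) - 1 := by
  have h1 := pvRm_le cs cs.length h
  have hl : 0 < cs.length := List.length_pos_of_ne_nil h
  have h2 := pvRm_ge cs cs.length (by omega) le_rfl
  omega

-- a repeated character's last index is already accounted for in the running maximum
theorem pvRepeat (cs : List Char) (k : Nat) (hk : k < cs.length)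
    (h : pvIsFirst cs k = false) : pvLa cs (cs.getD k ' ') ≤ pvRm cs k := by
  have hmem : cs.getD k ' ' ∈ cs.take k := by
    simp only [pvIsFirst, Bool.not_eq_false'] at h
    exact List.contains_iff_mem.mp h
  obtain ⟨j, hj, hjq⟩ := List.mem_iff_getElem.mp hmem
  have hjk : j < k := by
    have := hj; simp only [List.length_take] at this; omega
  have hjl : j < cs.length := lt_trans hjk hk
  have e1 : cs[j] = cs.getD k ' ' := by
    rw [← hjq]; simp [List.getElem_take]
  have e2 : cs.getD j ' ' = cs.getD k ' ' := by
    rw [List.getD_eq_getElem cs ' ' hjl]; exact e1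
  have h1 : pvLa cs (cs.getD k ' ') ≤ pvRm cs (j + 1) := by
    rw [← e2]; simp only [pvRm]; exact le_max_right _ _
  exact le_trans h1 (pvRm_mono cs hjk)

theorem pvRm_skip (cs : List Char) (k : Nat) (hk : k < cs.length)
    (h : pvIsFirst cs k = false) : pvRm cs (k + 1) = pvRm cs k := by
  simp only [pvRm]; exact max_eq_left (pvRepeat cs k hk h)

theorem pvIsFirst_after_cut (cs : List Char) (k : Nat) (hk : k < cs.length)
    (h : pvRm cs k = (k : Int) - 1) : pvIsFirst cs k = true := by
  by_contra hcon
  have hf : pvIsFirst cs k = false := by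
    cases hq : pvIsFirst cs k
    · rfl
    · exact absurd hq hcon
  have h1 := pvRepeat cs k hk hf
  have h2 := pvLa_ge cs k hk
  omega

theorem pvIsFirst_zero (cs : List Char) : pvIsFirst cs 0 = true := by
  simp [pvIsFirst]

theorem pvDictA (cs : List Char) (c : Char) :
    (((PySem.List.enumerate cs).foldl (fun d p => d.insert p.2 p.1)
        PySem.Dict.empty : PySem.Dict Char Int)).getD c 0 = pvLa cs c := by
  induction cs using List.reverseRecOn with
  | nil => simp [pvLa, PySem.List.enumerate_nil, PySem.Dict.getD_empty]
  | append_singleton xs x ih =>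
    rw [pvLa_append]
    simp only [PySem.List.enumerate_append, List.foldl_append]
    have h1 : PySem.List.enumerate [x] ((0 : Int) + xs.length) =
        [(((0 : Int) + xs.length, x) : Int × Char)] := by
      simp [PySem.List.enumerate_cons, PySem.List.enumerate_nil]
    rw [h1]
    simp only [List.foldl_cons, List.foldl_nil]
    rw [PySem.Dict.getD_insert]
    by_cases h : x = c
    · subst h; simp
    · rw [if_neg (Ne.symm h), if_neg h, ih]

-- ----- B's dict -----

-- B's interval dict (exactly the fold in port B)
def pvDB (cs : List Char) : PySem.Dict Char (Int × Int) :=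
  (PySem.List.enumerate cs).foldl
    (fun d p =>
      if d.contains p.2 then d.insert p.2 ((d.getD p.2 (0, 0)).1, p.1)
      else d.insert p.2 (p.1, p.1))
    PySem.Dict.empty

theorem pvDB_append (xs : List Char) (x : Char) :
    pvDB (xs ++ [x]) =
      (if (pvDB xs).contains x then
        (pvDB xs).insert x (((pvDB xs).getD x (0, 0)).1, ((0 : Int) + xs.length))
      else (pvDB xs).insert x (((0 : Int) + xs.length), ((0 : Int) + xs.length))) := by
  simp only [pvDB, PySem.List.enumerate_append, List.foldl_append]
  have h1 : PySem.List.enumerate [x] ((0 : Int) + xs.length) =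
      [(((0 : Int) + xs.length, x) : Int × Char)] := by
    simp [PySem.List.enumerate_cons, PySem.List.enumerate_nil]
  rw [h1]
  simp only [List.foldl_cons, List.foldl_nil]

theorem pvDB_nodup (cs : List Char) : (pvDB cs).keys.Nodup := by
  have hfun : (fun (d : PySem.Dict Char (Int × Int)) (p : Int × Char) =>
      if d.contains p.2 then d.insert p.2 ((d.getD p.2 (0, 0)).1, p.1)
      else d.insert p.2 (p.1, p.1)) =
      (fun d p => d.insert p.2
        (if d.contains p.2 then ((d.getD p.2 (0, 0)).1, p.1) else (p.1, p.1))) := by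
    funext d p; split <;> rfl
  rw [pvDB, hfun]
  exact PySem.Dict.nodup_keys_foldl_insert_key _ _ _ _ PySem.Dict.nodup_keys_empty

theorem pvIsFirst_append_lt (xs : List Char) (x : Char) (i : Nat) (h : i < xs.length) :
    pvIsFirst (xs ++ [x]) i = pvIsFirst xs i := by
  unfold pvIsFirst
  rw [List.take_append_of_le_length (le_of_lt h), List.getD_append _ _ _ _ h]

theorem pvIsFirst_append_self (xs : List Char) (x : Char) :
    pvIsFirst (xs ++ [x]) xs.length = !(xs.contains x) := by
  unfold pvIsFirst
  rw [List.take_append_of_le_length le_rfl, List.take_length]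
  have hg : (xs ++ [x]).getD xs.length ' ' = x := by
    simp [List.getD_eq_getElem?_getD]
  rw [hg]

theorem pvFirsts_append (xs : List Char) (x : Char) :
    (List.range (xs ++ [x]).length).filter (fun i => pvIsFirst (xs ++ [x]) i) =
      ((List.range xs.length).filter (fun i => pvIsFirst xs i)) ++
        (if xs.contains x then [] else [xs.length]) := by
  have hlen : (xs ++ [x]).length = xs.length + 1 := by simp
  rw [hlen, List.range_succ, List.filter_append]
  congr 1
  · exact List.filter_congr (fun i hi => pvIsFirst_append_lt xs x i (List.mem_range.mp hi))
  · rw [show List.filter (fun i => pvIsFirst (xs ++ [x]) i) [xs.length] =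
        if pvIsFirst (xs ++ [x]) xs.length then [xs.length] else [] from by
      simp [List.filter]; split <;> simp_all]
    rw [pvIsFirst_append_self]
    cases hx : xs.contains x <;> simp

theorem pvFirstsChars (xs : List Char) (c : Char) :
    c ∈ ((List.range xs.length).filter (fun i => pvIsFirst xs i)).map
        (fun i => xs.getD i ' ') ↔ c ∈ xs := by
  induction xs using List.reverseRecOn with
  | nil => simp
  | append_singleton ys y ih =>
    rw [pvFirsts_append]
    have hmapold : (((List.range ys.length).filter (fun i => pvIsFirst ys i)) ++
          (if ys.contains y then [] else [ys.length])).map (fun i => (ys ++ [y]).getD i ' ') =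
        (((List.range ys.length).filter (fun i => pvIsFirst ys i)).map (fun i => ys.getD i ' '))
          ++ ((if ys.contains y then [] else [ys.length]).map
                (fun i => (ys ++ [y]).getD i ' ')) := by
      rw [List.map_append]
      congr 1
      refine List.map_congr_left (fun i hi => ?_)
      have : i < ys.length := List.mem_range.mp (List.mem_of_mem_filter hi)
      exact List.getD_append _ _ _ _ this
    rw [hmapold]
    have hgl : (ys ++ [y]).getD ys.length ' ' = y := by
      simp [List.getD_eq_getElem?_getD]
    rw [List.mem_append, ih]
    by_cases hy : ys.contains y = true
    · rw [if_pos hy]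
      have hymem : y ∈ ys := List.contains_iff_mem.mp hy
      simp only [List.map_nil, List.not_mem_nil, or_false, List.mem_append,
        List.mem_singleton]
      constructor
      · exact Or.inl
      · rintro (h | rfl)
        · exact h
        · exact hymem
    · rw [if_neg hy]
      simp only [List.map_cons, List.map_nil, hgl, List.mem_append,
        List.mem_cons, List.not_mem_nil, or_false]

theorem pvDictB (cs : List Char) :
    (pvDB cs).items =
      ((List.range cs.length).filter (fun i => pvIsFirst cs i)).map
        (fun i => (cs.getD i ' ', ((i : Int), pvLa cs (cs.getD i ' ')))) := by
  induction cs using List.reverseRecOn with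
  | nil => simp [pvDB, PySem.List.enumerate_nil]; rfl
  | append_singleton xs x ih =>
    have hkeys : (pvDB xs).keys =
        ((List.range xs.length).filter (fun i => pvIsFirst xs i)).map
          (fun i => xs.getD i ' ') := by
      show (pvDB xs).items.map Prod.fst = _
      rw [ih, List.map_map]
      rfl
    have hcontains : (pvDB xs).contains x = xs.contains x := by
      rw [PySem.Dict.contains_eq_decide_mem_keys, hkeys]
      by_cases hx : x ∈ xs
      · have h1 := decide_eq_true ((pvFirstsChars xs x).mpr hx)
        have h2 : xs.contains x = true := List.contains_iff_mem.mpr hx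
        rw [h1, h2]
      · have h1 := decide_eq_false (fun hm => hx ((pvFirstsChars xs x).mp hm))
        have h2 : xs.contains x = false := by
          cases hq : xs.contains x
          · rfl
          · exact absurd (List.contains_iff_mem.mp hq) hx
        rw [h1, h2]
    rw [pvDB_append, pvFirsts_append]
    by_cases hx : xs.contains x = true
    · -- repeated character: update its item's second component in place
      rw [if_pos (show ((pvDB xs).contains x) = true from by rw [hcontains]; exact hx),
        if_pos hx, List.append_nil]
      have hxmem : x ∈ xs := List.contains_iff_mem.mp hx
      obtain ⟨i0, hi0mem, hi0val⟩ := List.mem_map.mp ((pvFirstsChars xs x).mpr hxmem)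
      have hi0lt : i0 < xs.length := List.mem_range.mp (List.mem_of_mem_filter hi0mem)
      have hitem : (x, ((i0 : Int), pvLa xs x)) ∈ (pvDB xs).items := by
        rw [ih]
        exact List.mem_map.mpr ⟨i0, hi0mem, by rw [hi0val]⟩
      have hgetD : (pvDB xs).getD x (0, 0) = ((i0 : Int), pvLa xs x) :=
        PySem.Dict.getD_of_mem_items _ hitem (pvDB_nodup xs) (0, 0)
      rw [PySem.Dict.items_insert_of_contains _ _ (by rw [hcontains]; exact hx)]
      rw [ih, hgetD, List.map_map]
      refine List.map_congr_left (fun i hi => ?_)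
      have hilt : i < xs.length := List.mem_range.mp (List.mem_of_mem_filter hi)
      have hgd : (xs ++ [x]).getD i ' ' = xs.getD i ' ' := List.getD_append _ _ _ _ hilt
      simp only [Function.comp_apply]
      by_cases hc : xs.getD i ' ' = x
      · have hieq : i = i0 := by
          have hnd : (((List.range xs.length).filter (fun i => pvIsFirst xs i)).map
              (fun i => xs.getD i ' ')).Nodup := by rw [← hkeys]; exact pvDB_nodup xs
          exact List.inj_on_of_nodup_map hnd hi hi0mem (by rw [hc, hi0val])
        subst hieq
        have hbe : ((xs.getD i ' ' : Char) == x) = true := beq_iff_eq.mpr hc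
        rw [if_pos hbe, hgd, hc, pvLa_append, if_pos rfl]
        simp
      · have hbe : ((xs.getD i ' ' : Char) == x) = false := beq_eq_false_iff_ne.mpr hc
        rw [if_neg (by rw [hbe]; exact Bool.false_ne_true), hgd, pvLa_append,
          if_neg (fun h => hc h.symm)]
    · -- fresh character: append a new (x, (n, n)) item
      have hx' : xs.contains x = false := by
        cases hq : xs.contains x
        · rfl
        · exact absurd hq hx
      rw [if_neg (show ¬ ((pvDB xs).contains x) = true from by rw [hcontains]; exact hx),
        if_neg hx]
      rw [PySem.Dict.items_insert_of_not_contains _ _ (by rw [hcontains]; exact hx')]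
      rw [ih, List.map_append]
      congr 1
      · refine List.map_congr_left (fun i hi => ?_)
        have hilt : i < xs.length := List.mem_range.mp (List.mem_of_mem_filter hi)
        have hgd : (xs ++ [x]).getD i ' ' = xs.getD i ' ' := List.getD_append _ _ _ _ hilt
        have hcmem : xs.getD i ' ' ∈ xs := by
          rw [List.getD_eq_getElem xs ' ' hilt]; exact List.getElem_mem _
        have hne : x ≠ xs.getD i ' ' := by
          intro hEq
          exact hx (List.contains_iff_mem.mpr (hEq ▸ hcmem))
        rw [hgd, pvLa_append, if_neg hne]
      · have hgl : (xs ++ [x]).getD xs.length ' ' = x := by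
          simp [List.getD_eq_getElem?_getD]
        simp [pvLa_append]

-- ----- the two loops -----

theorem pvAinv (cs : List Char) (k : Nat) (hk : k ≤ cs.length) :
    ((PySem.List.enumerate cs).take k).foldl
      (fun (st : Int × Int × List Int) p =>
        if p.1 = max st.1 (pvLa cs p.2) then
          (max st.1 (pvLa cs p.2), p.1 + 1, st.2.2 ++ [p.1 - st.2.1 + 1])
        else (max st.1 (pvLa cs p.2), st.2.1, st.2.2))
      (0, 0, []) =
    (pvRm cs k, pvAnch 0 (pvCuts cs k), pvLens 0 (pvCuts cs k)) := by
  induction k with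
  | zero => simp [pvCuts, pvRm, pvAnch, pvLens]
  | succ m ih =>
    have hml : m < cs.length := hk
    rw [List.take_add_one]
    have he : (PySem.List.enumerate cs)[m]? = some ((m : Int), cs[m]) := by
      rw [PySem.List.getElem?_enumerate]
      simp [List.getElem?_eq_getElem hml]
    rw [he]
    simp only [Option.toList_some]
    rw [List.foldl_append, ih (le_of_lt hml)]
    simp only [List.foldl_cons, List.foldl_nil]
    have hgd : cs.getD m ' ' = cs[m] := List.getD_eq_getElem cs ' ' hml
    have hj : max (pvRm cs m) (pvLa cs cs[m]) = pvRm cs (m + 1) := by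
      simp only [pvRm, hgd]
    rw [hj, pvCuts_succ]
    by_cases hcut : pvRm cs (m + 1) = (m : Int)
    · rw [if_pos hcut.symm, if_pos hcut, pvLens_append, pvAnch_append]
    · rw [if_neg (fun h => hcut h.symm), if_neg hcut]
      simp

-- B's merge step (exactly the loop body in port B)
def pvStep (st : Option (Int × Int) × List Int) (iv : Int × Int) :
    Option (Int × Int) × List Int :=
  match st.1 with
  | none => (some iv, st.2)
  | some cur =>
    if iv.1 ≤ cur.2 then (some (cur.1, max cur.2 iv.2), st.2)
    else (some iv, st.2 ++ [cur.2 - cur.1 + 1])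

theorem pvBinv (cs : List Char) (k : Nat) (h1 : 1 ≤ k) (hk : k ≤ cs.length) :
    ((List.range k).foldl
      (fun (st : Option (Int × Int) × List Int) i =>
        if pvIsFirst cs i then pvStep st ((i : Int), pvLa cs (cs.getD i ' ')) else st)
      (none, [])) =
    (if pvRm cs k = (k : Int) - 1 then
        (some (pvAnch 0 (pvCuts cs (k - 1)), pvRm cs k), pvLens 0 (pvCuts cs (k - 1)))
      else
        (some (pvAnch 0 (pvCuts cs k), pvRm cs k), pvLens 0 (pvCuts cs k))) := by
  revert hk
  induction k, h1 using Nat.le_induction with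
  | base =>
    intro hk
    have hrm1 : pvRm cs 1 = pvLa cs (cs.getD 0 ' ') := by
      simp only [pvRm]
      exact max_eq_right (pvLa_nonneg cs _)
    have hL : ((List.range 1).foldl
        (fun (st : Option (Int × Int) × List Int) i =>
          if pvIsFirst cs i then pvStep st ((i : Int), pvLa cs (cs.getD i ' ')) else st)
        (none, [])) = (some ((((0 : Nat)) : Int), pvLa cs (cs.getD 0 ' ')), []) := by
      simp [List.range_one, pvIsFirst_zero, pvStep]
    rw [hL]
    by_cases hp : pvRm cs 1 = ((1 : Nat) : Int) - 1
    · rw [if_pos hp]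
      have hc0 : pvCuts cs (1 - 1) = [] := rfl
      rw [hc0]
      simp [pvAnch, pvLens, hrm1]
    · rw [if_neg hp]
      have hcut : ¬ (pvRm cs (0 + 1) = ((0 : Nat) : Int)) := by
        intro h
        apply hp
        rw [show ((1 : Nat) : Int) - 1 = ((0 : Nat) : Int) from by norm_num]
        exact h
      have hc1 : pvCuts cs 1 = [] := by
        have h2 := pvCuts_succ cs 0
        rw [if_neg hcut] at h2
        simpa using h2
      rw [hc1]
      simp [pvAnch, pvLens, hrm1]
  | succ k hk1 ih =>
    intro hk
    have hkl : k < cs.length := by omega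
    rw [List.range_succ, List.foldl_append, ih (by omega)]
    simp only [List.foldl_cons, List.foldl_nil]
    have hge := pvRm_ge cs k hk1 (by omega)
    have hla := pvLa_ge cs k hkl
    have hrm1 : pvRm cs (k + 1) = max (pvRm cs k) (pvLa cs (cs.getD k ' ')) := by
      simp only [pvRm]
    by_cases hp : pvRm cs k = (k : Int) - 1
    · -- a cut at k-1 is pending; position k starts a fresh character and a new block
      rw [if_pos hp]
      have hf : pvIsFirst cs k = true := pvIsFirst_after_cut cs k hkl hp
      rw [if_pos hf]
      simp only [pvStep]
      rw [if_neg (by omega : ¬ ((k : Int) ≤ pvRm cs k))]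
      obtain ⟨m, rfl⟩ : ∃ m, k = m + 1 := ⟨k - 1, by omega⟩
      have hpm : pvRm cs (m + 1) = (m : Int) := by push_cast at hp; omega
      have hck : pvCuts cs (m + 1) = pvCuts cs m ++ [m] := by
        rw [pvCuts_succ, if_pos hpm]
      have hanch : pvAnch 0 (pvCuts cs (m + 1)) = (m : Int) + 1 := by
        rw [hck, pvAnch_append]
      have hlens : pvLens 0 (pvCuts cs (m + 1)) =
          pvLens 0 (pvCuts cs m) ++ [(m : Int) - pvAnch 0 (pvCuts cs m) + 1] := by
        rw [hck, pvLens_append]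
      have hrm2 : pvRm cs (m + 1 + 1) = pvLa cs (cs.getD (m + 1) ' ') := by
        rw [hrm1]
        exact max_eq_right (by omega)
      by_cases hp2 : pvRm cs (m + 1 + 1) = ((m + 1 + 1 : Nat) : Int) - 1
      · rw [if_pos hp2]
        simp only [Nat.add_sub_cancel]
        rw [hanch, hlens, hrm2, hpm]
        push_cast
        rfl
      · rw [if_neg hp2]
        have hnc : ¬ (pvRm cs (m + 1 + 1) = ((m + 1 : Nat) : Int)) := by
          push_cast at hp2 ⊢
          omega
        have hck2 : pvCuts cs (m + 1 + 1) = pvCuts cs (m + 1) := by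
          rw [pvCuts_succ, if_neg hnc, List.append_nil]
        rw [hck2, hanch, hlens, hrm2, hpm]
        push_cast
        rfl
    · -- no pending cut: either merge (first occurrence) or skip (repeat)
      rw [if_neg hp]
      have hge' : (k : Int) ≤ pvRm cs k := by omega
      have hstep : (if pvIsFirst cs k then
            pvStep (some (pvAnch 0 (pvCuts cs k), pvRm cs k), pvLens 0 (pvCuts cs k))
              ((k : Int), pvLa cs (cs.getD k ' '))
          else (some (pvAnch 0 (pvCuts cs k), pvRm cs k), pvLens 0 (pvCuts cs k))) =
          (some (pvAnch 0 (pvCuts cs k), pvRm cs (k + 1)), pvLens 0 (pvCuts cs k)) := by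
        by_cases hf : pvIsFirst cs k = true
        · rw [if_pos hf]
          simp only [pvStep]
          rw [if_pos hge', hrm1]
        · rw [if_neg hf]
          have hf' : pvIsFirst cs k = false := by
            cases hq : pvIsFirst cs k
            · rfl
            · exact absurd hq hf
          rw [pvRm_skip cs k hkl hf']
      rw [hstep]
      by_cases hp2 : pvRm cs (k + 1) = ((k + 1 : Nat) : Int) - 1
      · rw [if_pos hp2]
        simp only [Nat.add_sub_cancel]
      · rw [if_neg hp2]
        have hnc : ¬ (pvRm cs (k + 1) = (k : Int)) := by
          push_cast at hp2 ⊢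
          omega
        have hck2 : pvCuts cs (k + 1) = pvCuts cs k := by
          rw [pvCuts_succ, if_neg hnc, List.append_nil]
        rw [hck2]

-- ===== VERDICT (by name: the statement is the Claim_ definition above) =====
theorem doit_greedy_spec : Claim_equal_doit_greedy := by
  intro S _
  unfold Spec_doit_greedy
  rcases eq_or_ne S.toList [] with hnil | hne
  · unfold doit_greedy doit_greedy_alt
    rw [hnil]
    rfl
  · have hlen : 1 ≤ S.toList.length := List.length_pos_of_ne_nil hne
    have hA : doit_greedy S = pvLens 0 (pvCuts S.toList S.toList.length) := by
      have hfun : (fun (st : Int × Int × List Int) (p : Int × Char) =>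
            let j := max st.1 ((((PySem.List.enumerate S.toList).foldl
                (fun d p => d.insert p.2 p.1) PySem.Dict.empty : PySem.Dict Char Int)).getD p.2 0)
            if p.1 = j then (j, p.1 + 1, st.2.2 ++ [p.1 - st.2.1 + 1])
            else (j, st.2.1, st.2.2)) =
            (fun (st : Int × Int × List Int) (p : Int × Char) =>
              if p.1 = max st.1 (pvLa S.toList p.2) then
                (max st.1 (pvLa S.toList p.2), p.1 + 1, st.2.2 ++ [p.1 - st.2.1 + 1])
              else (max st.1 (pvLa S.toList p.2), st.2.1, st.2.2)) := by
          funext st p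
          simp only [pvDictA]
      have h0 : doit_greedy S =
          (((PySem.List.enumerate S.toList).foldl
            (fun (st : Int × Int × List Int) (p : Int × Char) =>
              let j := max st.1 ((((PySem.List.enumerate S.toList).foldl
                  (fun d p => d.insert p.2 p.1) PySem.Dict.empty : PySem.Dict Char Int)).getD p.2 0)
              if p.1 = j then (j, p.1 + 1, st.2.2 ++ [p.1 - st.2.1 + 1])
              else (j, st.2.1, st.2.2))
            (0, 0, ([] : List Int))).2.2) := rfl
      have htake : (PySem.List.enumerate S.toList).take S.toList.length =
          PySem.List.enumerate S.toList := by
        rw [← PySem.List.length_enumerate S.toList 0]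
        exact List.take_length
      rw [h0, hfun, ← htake, pvAinv S.toList S.toList.length le_rfl]
    have hB : doit_greedy_alt S = pvLens 0 (pvCuts S.toList S.toList.length) := by
      have h1 : doit_greedy_alt S =
          (match (((pvDB S.toList).values).foldl pvStep
              ((none : Option (Int × Int)), ([] : List Int))).1 with
           | none => (((pvDB S.toList).values).foldl pvStep
              ((none : Option (Int × Int)), ([] : List Int))).2
           | some cur => (((pvDB S.toList).values).foldl pvStep
              ((none : Option (Int × Int)), ([] : List Int))).2 ++ [cur.2 - cur.1 + 1]) := rfl
      have hvals : (pvDB S.toList).values =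
          ((List.range S.toList.length).filter (fun i => pvIsFirst S.toList i)).map
            (fun (i : Nat) => ((i : Int), pvLa S.toList (S.toList.getD i ' '))) := by
        show (pvDB S.toList).items.map Prod.snd = _
        rw [pvDictB, List.map_map]
        rfl
      have h3 : (((pvDB S.toList).values).foldl pvStep
            ((none : Option (Int × Int)), ([] : List Int))) =
          (if pvRm S.toList S.toList.length = (S.toList.length : Int) - 1 then
              (some (pvAnch 0 (pvCuts S.toList (S.toList.length - 1)),
                  pvRm S.toList S.toList.length),
                pvLens 0 (pvCuts S.toList (S.toList.length - 1)))
            else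
              (some (pvAnch 0 (pvCuts S.toList S.toList.length),
                  pvRm S.toList S.toList.length),
                pvLens 0 (pvCuts S.toList S.toList.length))) := by
        rw [hvals, List.foldl_map, List.foldl_filter]
        exact pvBinv S.toList S.toList.length hlen le_rfl
      have hfin : pvRm S.toList S.toList.length = (S.toList.length : Int) - 1 :=
        pvRm_final _ hne
      rw [h1, h3, if_pos hfin]
      show pvLens 0 (pvCuts S.toList (S.toList.length - 1)) ++
          [pvRm S.toList S.toList.length -
            pvAnch 0 (pvCuts S.toList (S.toList.length - 1)) + 1] =
          pvLens 0 (pvCuts S.toList S.toList.length)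
      obtain ⟨m, hm⟩ : ∃ m, S.toList.length = m + 1 := ⟨S.toList.length - 1, by omega⟩
      rw [hm] at hfin ⊢
      simp only [Nat.add_sub_cancel]
      have hcut : pvRm S.toList (m + 1) = (m : Int) := by push_cast at hfin; omega
      rw [hcut, pvCuts_succ, if_pos hcut, pvLens_append]
    rw [hA, hB]
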